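-- pv_equiv track=rewrite | github.com/rlhjansen/zsb_halma | zsb2/Classes.py | get_start_locations
-- ===== SOURCE A (Python) =====
-- def get_start_locations(number, size, rows):
--     pieces = []
--     if number == 0:
--         for x in range(rows):
--             for y in range(rows):
--                 if x+y < rows:
--                     pieces.append([x,y])
--     elif number == 2:
--         x_range = [size-x for x in range(rows)]
--         for x in x_range:
--             for y in range(rows):
--                 if size-rows < x-y:
--                     pieces.append([x,y])
--     elif number == 3:
--         y_range = [size-y for y in range(rows)]
--         for x in range(rows):
--             for y in y_range:
--                 if size-rows < y-x:
--                     pieces.append([x,y])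
--     elif number == 1:
--         x_range = [size-x for x in range(rows)]
--         y_range = [size-y for y in range(rows)]
--         for x in x_range:
--             for y in y_range:
--                 if 2*size - rows < x+y:
--                     pieces.append([x,y])
--     return pieces
-- ===== SOURCE B (Python) =====
-- def get_start_locations(number, size, rows):
--     # Odometer pass: compute the triangular piece count in closed form, then
--     # emit coordinates with a carry-style (x, y) state machine instead of
--     # nested filtered loops; the player number selects per-axis reflections.
--     if number not in (0, 1, 2, 3):
--         return []
--     n = rows if rows > 0 else 0
--     total = n * (n + 1) // 2
--     pieces = []
--     x = y = 0
--     for _ in range(total):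
--         pieces.append([size - x if number in (1, 2) else x,
--                        size - y if number in (1, 3) else y])
--         y += 1
--         if x + y == rows:
--             x += 1
--             y = 0
--     return pieces
-- ===== Notes on version B (the rewrite author's own statement) =====
-- stated objective: alternative
-- what changed: Replaced A's four branch-specific nested filtered double loops by a single flat loop over the closed-form triangular count rows*(rows+1)//2 driving an odometer-style (x,y) carry state machine, with per-axis reflection chosen from the player number.
import Mathlib
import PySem

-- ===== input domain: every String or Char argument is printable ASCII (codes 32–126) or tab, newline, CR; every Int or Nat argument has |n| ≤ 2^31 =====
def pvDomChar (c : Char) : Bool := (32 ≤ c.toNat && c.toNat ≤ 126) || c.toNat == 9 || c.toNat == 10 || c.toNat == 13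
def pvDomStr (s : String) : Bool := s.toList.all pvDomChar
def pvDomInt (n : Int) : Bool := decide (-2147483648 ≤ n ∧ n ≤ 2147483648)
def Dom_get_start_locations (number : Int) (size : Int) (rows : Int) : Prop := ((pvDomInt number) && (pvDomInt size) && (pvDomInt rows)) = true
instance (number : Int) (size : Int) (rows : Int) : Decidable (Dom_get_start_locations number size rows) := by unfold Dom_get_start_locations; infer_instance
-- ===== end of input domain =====

-- B replaces A's four branch-specific filtered double loops by one flat loop over the
-- closed-form triangular count driving an odometer-style (x,y) carry state machine,
-- with per-axis reflection chosen from the player number (alternative decomposition, same cost).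


-- ===== PORT A =====
def get_start_locations (number : Int) (size : Int) (rows : Int) : List (List Int) :=
  let pieces : List (List Int) := []
  if number = 0 then
    (PySem.List.pyRange 0 rows 1).foldl (fun pieces x =>
      (PySem.List.pyRange 0 rows 1).foldl (fun pieces y =>
        if x + y < rows then pieces ++ [[x, y]] else pieces) pieces) pieces
  else if number = 2 then
    let x_range := (PySem.List.pyRange 0 rows 1).map (fun x => size - x)
    x_range.foldl (fun pieces x =>
      (PySem.List.pyRange 0 rows 1).foldl (fun pieces y =>
        if size - rows < x - y then pieces ++ [[x, y]] else pieces) pieces) pieces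
  else if number = 3 then
    let y_range := (PySem.List.pyRange 0 rows 1).map (fun y => size - y)
    (PySem.List.pyRange 0 rows 1).foldl (fun pieces x =>
      y_range.foldl (fun pieces y =>
        if size - rows < y - x then pieces ++ [[x, y]] else pieces) pieces) pieces
  else if number = 1 then
    let x_range := (PySem.List.pyRange 0 rows 1).map (fun x => size - x)
    let y_range := (PySem.List.pyRange 0 rows 1).map (fun y => size - y)
    x_range.foldl (fun pieces x =>
      y_range.foldl (fun pieces y =>
        if 2 * size - rows < x + y then pieces ++ [[x, y]] else pieces) pieces) pieces
  else
    pieces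

-- ===== PORT B =====
def get_start_locations_alt (number : Int) (size : Int) (rows : Int) : List (List Int) :=
  if ¬ (number = 0 ∨ number = 1 ∨ number = 2 ∨ number = 3) then []
  else
    let n : Int := if rows > 0 then rows else 0
    let total := PySem.Int.floordiv (n * (n + 1)) 2
    let res := (PySem.List.pyRange 0 total 1).foldl
      (fun (st : List (List Int) × Int × Int) _ =>
        let pieces := st.1 ++ [[if number = 1 ∨ number = 2 then size - st.2.1 else st.2.1,
                                if number = 1 ∨ number = 3 then size - st.2.2 else st.2.2]]
        let y := st.2.2 + 1
        if st.2.1 + y = rows then (pieces, st.2.1 + 1, 0) else (pieces, st.2.1, y))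
      ([], 0, 0)
    res.1

-- ===== PRECONDITION & SPEC =====
def Spec_get_start_locations (number : Int) (size : Int) (rows : Int) (out : List (List Int)) : Prop := out = get_start_locations_alt number size rows
instance (number : Int) (size : Int) (rows : Int) (out : List (List Int)) : Decidable (Spec_get_start_locations number size rows out) := by unfold Spec_get_start_locations; infer_instance

-- ===== CLAIM (what is proved, stated in full; the proofs are below) =====
def Claim_equal_get_start_locations : Prop := ∀ (number : Int) (size : Int) (rows : Int), Dom_get_start_locations number size rows → Spec_get_start_locations number size rows (get_start_locations number size rows)

-- ===== LEMMAS AND PROOFS =====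

-- B's loop body, abstracted over the two reflection maps (one odometer step).
def pvStep (fx fy : Int → Int) (r : Int) (st : List (List Int) × Int × Int) :
    List (List Int) × Int × Int :=
  let pieces := st.1 ++ [[fx st.2.1, fy st.2.2]]
  let y := st.2.2 + 1
  if st.2.1 + y = r then (pieces, st.2.1 + 1, 0) else (pieces, st.2.1, y)

-- The triangle emitted row by row from row x, with j rows left (row lengths j, j-1, …, 1).
def pvTri (fx fy : Int → Int) (x : Int) : Nat → List (List Int)
  | 0 => []
  | j+1 => (List.range (j+1)).map (fun (i : Nat) => [fx x, fy ((i : Int))]) ++ pvTri fx fy (x+1) j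

-- a fold whose body ignores the elements is an iterate
theorem pv_foldl_const {α β : Type} (g : β → β) (l : List α) (s : β) :
    l.foldl (fun s _ => g s) s = g^[l.length] s := by
  induction l generalizing s with
  | nil => rfl
  | cons a t ih => simp [List.foldl_cons, ih, Function.iterate_succ_apply]

-- a map over a nonnegative Python range is a map over List.range
theorem pv_map_pyRange_nat {β : Type} (f : Int → β) (m : Nat) :
    (PySem.List.pyRange 0 (m : Int) 1).map f = (List.range m).map (fun (i : Nat) => f (i : Int)) := by
  rw [PySem.List.pyRange_one, List.map_map, show (((m : Int)) - 0).toNat = m by omega]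
  exact List.map_congr_left fun i _ => by simp

-- m+1 odometer steps finish the current row (x, y..y+m) and carry to row x+1
theorem pv_row (fx fy : Int → Int) (r : Int) (m : Nat) :
    ∀ (acc : List (List Int)) (x y : Int), x + y + ((m : Int) + 1) = r →
    (pvStep fx fy r)^[m+1] (acc, x, y) =
      (acc ++ (List.range (m+1)).map (fun (i : Nat) => [fx x, fy (y + (i : Int))]), x + 1, 0) := by
  induction m with
  | zero =>
    intro acc x y h
    simp [pvStep, show x + (y + 1) = r by omega]
  | succ m ih =>
    intro acc x y h
    rw [Function.iterate_succ_apply]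
    have hstep : pvStep fx fy r (acc, x, y) = (acc ++ [[fx x, fy y]], x, y + 1) := by
      simp [pvStep, show ¬ (x + (y + 1) = r) by omega]
    rw [hstep, ih _ x (y + 1) (by push_cast at h ⊢; omega)]
    have hrow : (List.range (m+1+1)).map (fun (i : Nat) => [fx x, fy (y + (i : Int))])
        = [fx x, fy y] :: (List.range (m+1)).map (fun (i : Nat) => [fx x, fy (y + 1 + (i : Int))]) := by
      rw [List.range_succ_eq_map, List.map_cons, List.map_map]
      refine congrArg₂ _ (by norm_num) (List.map_congr_left fun i _ => ?_)
      show [fx x, fy (y + ((i + 1 : Nat) : Int))] = [fx x, fy (y + 1 + (i : Int))]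
      rw [show y + ((i + 1 : Nat) : Int) = y + 1 + (i : Int) by push_cast; ring]
    rw [hrow]
    simp [List.append_assoc]

-- T(j) odometer steps from the start of row x emit the whole remaining triangle
theorem pv_tri_iter (fx fy : Int → Int) (r : Int) (j : Nat) :
    ∀ (acc : List (List Int)) (x : Int), x + (j : Int) = r →
    (pvStep fx fy r)^[j * (j+1) / 2] (acc, x, 0) =
      (acc ++ pvTri fx fy x j, x + (j : Int), 0) := by
  induction j with
  | zero => intro acc x h; simp [pvTri]
  | succ j ih =>
    intro acc x h
    have hT : (j + 1) * (j + 1 + 1) / 2 = j * (j + 1) / 2 + (j + 1) := by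
      rw [show (j+1)*(j+1+1) = j*(j+1) + (j+1)*2 by ring,
          Nat.add_mul_div_right _ _ (by norm_num)]
    rw [hT, Function.iterate_add_apply]
    rw [pv_row fx fy r j acc x 0 (by push_cast at h ⊢; omega)]
    rw [ih _ (x + 1) (by push_cast at h ⊢; omega)]
    simp only [pvTri]
    rw [Prod.mk.injEq, Prod.mk.injEq]
    refine ⟨?_, ?_, rfl⟩
    · simp [List.append_assoc]
    · push_cast; ring

-- the triangle as A's flatMap over Python ranges
theorem pv_tri_flatMap (fx fy : Int → Int) (j : Nat) :
    ∀ (x : Int), pvTri fx fy x j =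
      (PySem.List.pyRange x (x + (j : Int)) 1).flatMap
        (fun k => (PySem.List.pyRange 0 (x + (j : Int) - k) 1).map (fun i => [fx k, fy i])) := by
  induction j with
  | zero =>
    intro x
    rw [show x + ((0 : Nat) : Int) = x by norm_num, PySem.List.pyRange_one_eq_nil (le_refl x)]
    rfl
  | succ j ih =>
    intro x
    rw [PySem.List.pyRange_one_cons (by push_cast; omega), List.flatMap_cons]
    simp only [pvTri]
    refine congrArg₂ _ ?_ ?_
    · rw [show x + ((j + 1 : Nat) : Int) - x = ((j + 1 : Nat) : Int) by ring,
          pv_map_pyRange_nat]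
    · rw [show x + ((j + 1 : Nat) : Int) = x + 1 + (j : Int) by push_cast; ring]
      exact ih (x + 1)

-- A's filtered inner loop is a truncated range
theorem pv_filter_range (r x : Int) (hx : 0 ≤ x) :
    (PySem.List.pyRange 0 r 1).filter (fun y => decide (x + y < r)) =
      PySem.List.pyRange 0 (r - x) 1 := by
  by_cases hxr : x ≤ r
  · rw [PySem.List.pyRange_one_append 0 (r - x) r (by omega) (by omega), List.filter_append]
    rw [List.filter_eq_self.2 ?_, List.filter_eq_nil_iff.2 ?_, List.append_nil]
    · intro y hy
      rw [PySem.List.mem_pyRange_one] at hy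
      simp only [decide_eq_true_eq]
      omega
    · intro y hy
      rw [PySem.List.mem_pyRange_one] at hy
      simp only [decide_eq_true_eq]
      omega
  · rw [show PySem.List.pyRange 0 (r - x) 1 = [] from PySem.List.pyRange_one_eq_nil (by omega),
        List.filter_eq_nil_iff]
    intro y hy
    rw [PySem.List.mem_pyRange_one] at hy
    simp only [decide_eq_true_eq]
    omega

-- generic canonical form of A's double loop
theorem pv_canonA (fx fy : Int → Int) (r : Int) :
    (PySem.List.pyRange 0 r 1).flatMap
        (fun x => ((PySem.List.pyRange 0 r 1).filter (fun y => decide (x + y < r))).map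
          (fun y => [fx x, fy y])) = pvTri fx fy 0 r.toNat := by
  by_cases hr : 0 ≤ r
  · rw [pv_tri_flatMap fx fy r.toNat 0, show (0 : Int) + (r.toNat : Int) = r by omega]
    refine List.flatMap_congr fun x hx => ?_
    rw [PySem.List.mem_pyRange_one] at hx
    rw [pv_filter_range r x hx.1]
  · rw [show PySem.List.pyRange 0 r 1 = [] from PySem.List.pyRange_one_eq_nil (by omega),
        show r.toNat = 0 by omega]
    rfl

-- generic canonical form of B's odometer loop
theorem pv_canonB (fx fy : Int → Int) (r : Int) :
    ((PySem.List.pyRange 0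
        (PySem.Int.floordiv ((if r > 0 then r else 0) * ((if r > 0 then r else 0) + 1)) 2) 1).foldl
        (fun (st : List (List Int) × Int × Int) _ => pvStep fx fy r st) ([], 0, 0)).1
      = pvTri fx fy 0 r.toNat := by
  by_cases hr : r > 0
  · rw [if_pos hr, pv_foldl_const]
    have h2 : PySem.Int.floordiv (r * (r + 1)) 2 = ((r.toNat * (r.toNat + 1) / 2 : Nat) : Int) := by
      rw [show r = (r.toNat : Int) by omega]
      exact_mod_cast PySem.Int.floordiv_natCast (r.toNat * (r.toNat + 1)) 2
    rw [h2, PySem.List.length_pyRange_one,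
        show ((((r.toNat * (r.toNat + 1) / 2 : Nat) : Int)) - 0).toNat = r.toNat * (r.toNat + 1) / 2 by omega]
    rw [pv_tri_iter fx fy r r.toNat [] 0 (by omega)]
    rfl
  · rw [if_neg hr, show r.toNat = 0 by omega]
    rfl

-- Prop-conditioned form of the library loop-shape lemma PySem.List.foldl_append_if
theorem pv_foldl_append_ite {α β : Type} (p : α → Prop) [DecidablePred p] (f : α → β)
    (l : List α) (acc : List β) :
    l.foldl (fun acc x => if p x then acc ++ [f x] else acc) acc
      = acc ++ (l.filter (fun x => decide (p x))).map f := by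
  rw [← PySem.List.foldl_append_if (fun x => decide (p x)) f l acc]
  simp

-- each of A's four branches equals B's odometer pass via the common triangle pvTri
theorem pv_eq_alt (n s r : Int) :
    get_start_locations n s r = get_start_locations_alt n s r := by
  unfold get_start_locations get_start_locations_alt
  by_cases h0 : n = 0
  · subst h0
    have hB := pv_canonB (fun x => if (0:Int) = 1 ∨ (0:Int) = 2 then s - x else x)
                         (fun y => if (0:Int) = 1 ∨ (0:Int) = 3 then s - y else y) r
    norm_num at hB
    norm_num
    refine Eq.trans ?_ hB.symm
    simp only [pv_foldl_append_ite, PySem.List.foldl_append_eq_flatMap, List.nil_append]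
    exact pv_canonA (fun x => x) (fun y => y) r
  · by_cases h2 : n = 2
    · subst h2
      have hB := pv_canonB (fun x => if (2:Int) = 1 ∨ (2:Int) = 2 then s - x else x)
                           (fun y => if (2:Int) = 1 ∨ (2:Int) = 3 then s - y else y) r
      norm_num at hB
      norm_num
      refine Eq.trans ?_ hB.symm
      simp only [List.foldl_map, pv_foldl_append_ite, PySem.List.foldl_append_eq_flatMap,
        List.nil_append]
      refine Eq.trans (List.flatMap_congr fun x hx => ?_)
        (pv_canonA (fun x => s - x) (fun y => y) r)
      refine congrArg _ (List.filter_congr fun y _ => ?_)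
      simp only [decide_eq_decide]
      omega
    · by_cases h3 : n = 3
      · subst h3
        have hB := pv_canonB (fun x => if (3:Int) = 1 ∨ (3:Int) = 2 then s - x else x)
                             (fun y => if (3:Int) = 1 ∨ (3:Int) = 3 then s - y else y) r
        norm_num at hB
        norm_num
        refine Eq.trans ?_ hB.symm
        simp only [List.foldl_map, pv_foldl_append_ite, PySem.List.foldl_append_eq_flatMap,
          List.nil_append]
        refine Eq.trans (List.flatMap_congr fun x hx => ?_)
          (pv_canonA (fun x => x) (fun y => s - y) r)
        refine congrArg _ (List.filter_congr fun y _ => ?_)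
        simp only [decide_eq_decide]
        omega
      · by_cases h1 : n = 1
        · subst h1
          have hB := pv_canonB (fun x => if (1:Int) = 1 ∨ (1:Int) = 2 then s - x else x)
                               (fun y => if (1:Int) = 1 ∨ (1:Int) = 3 then s - y else y) r
          norm_num at hB
          norm_num
          refine Eq.trans ?_ hB.symm
          simp only [List.foldl_map, pv_foldl_append_ite, PySem.List.foldl_append_eq_flatMap,
            List.nil_append]
          refine Eq.trans (List.flatMap_congr fun x hx => ?_)
            (pv_canonA (fun x => s - x) (fun y => s - y) r)
          refine congrArg _ (List.filter_congr fun y _ => ?_)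
          simp only [decide_eq_decide]
          omega
        · simp [h0, h1, h2, h3]

-- ===== VERDICT (by name: the statement is the Claim_ definition above) =====
theorem get_start_locations_spec : Claim_equal_get_start_locations := by
  intro n s r _
  exact pv_eq_alt n s r
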